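-- pv_equiv track=rewrite | github.com/dhanush005-rass/ZohoSP | Pyhton/Problems/Freqlist.py | freqlst
-- ===== SOURCE A (Python) =====
-- def freqlst(lst):
--     freq = {}
--     for item in lst:
--         freq[item] = freq.get(item, 0) + 1
--     lst.clear()
--     for key, value in freq.items():
--         lst.append(key)
--         if (value>1):
--             lst.append(value)
--     return lst
-- ===== SOURCE B (Python) =====
-- def freqlst(lst):
--     original = list(lst)
--     lst.clear()
--     seen = set()
--     for item in original:
--         if item not in seen:
--             seen.add(item)
--             lst.append(item)
--             cnt = original.count(item)
--             if cnt > 1: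
--                 lst.append(cnt)
--     return lst
-- ===== Notes on version B (the rewrite author's own statement) =====
-- stated objective: alternative
-- what changed: Replaces the dict frequency table with a snapshot-then-rescan approach: a seen set preserves first-occurrence order and each unique item's count is obtained by original.count, removing the dict entirely (O(n^2) scans instead of one O(n) table pass).
import Mathlib
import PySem

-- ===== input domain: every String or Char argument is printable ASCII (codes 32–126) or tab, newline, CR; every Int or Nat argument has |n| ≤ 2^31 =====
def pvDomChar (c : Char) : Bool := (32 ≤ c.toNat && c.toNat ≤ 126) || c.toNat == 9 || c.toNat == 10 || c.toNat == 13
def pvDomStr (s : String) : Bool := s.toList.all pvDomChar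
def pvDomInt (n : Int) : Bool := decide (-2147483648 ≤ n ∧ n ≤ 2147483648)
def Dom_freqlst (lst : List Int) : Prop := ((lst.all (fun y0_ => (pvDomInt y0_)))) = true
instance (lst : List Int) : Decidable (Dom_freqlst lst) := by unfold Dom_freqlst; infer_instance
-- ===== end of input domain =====

-- B replaces A's dict frequency table by a snapshot + seen-set + repeated .count rescans
-- (alternative decomposition, not faster). Both Pythons mutate and return the same list
-- object; B performs the same in-place mutation, and the equivalence proved here is about
-- the returned value.

-- ===== PORT A =====
def freqlst (lst : List Int) : List Int :=
  (lst.foldl (fun d item => d.insert item (d.getD item 0 + 1))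
      (PySem.Dict.empty : PySem.Dict Int Int)).items.foldl
    (fun acc kv =>
      let acc1 := acc ++ [kv.1]
      if kv.2 > 1 then acc1 ++ [kv.2] else acc1) []

-- ===== PORT B =====
-- ('original = list(lst)' is a snapshot of the immutable input, so it is lst itself here)
def freqlst_alt (lst : List Int) : List Int :=
  (lst.foldl (fun st item =>
      if PySem.Set.contains st.1 item then st
      else
        let seen := PySem.Set.add st.1 item
        let out := st.2 ++ [item]
        let cnt : Int := (lst.count item : Int)
        (seen, if cnt > 1 then out ++ [cnt] else out))
    ((PySem.Set.empty : PySem.Set Int), ([] : List Int))).2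

-- ===== PRECONDITION & SPEC =====
def Spec_freqlst (lst : List Int) (out : List Int) : Prop := out = freqlst_alt lst
instance (lst : List Int) (out : List Int) : Decidable (Spec_freqlst lst out) := by unfold Spec_freqlst; infer_instance

-- ===== CLAIM (what is proved, stated in full; the proofs are below) =====
def Claim_equal_freqlst : Prop := ∀ (lst : List Int), Dom_freqlst lst → Spec_freqlst lst (freqlst lst)

-- ===== LEMMAS AND PROOFS =====

-- the per-key output block both programs emit
def pvBlock (orig : List Int) (k : Int) : List Int :=
  k :: (if 1 < orig.count k then [(orig.count k : Int)] else [])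

-- the elements of xs not yet in s, first occurrences, in order
def pvNewKeys (s : PySem.Set Int) : List Int → List Int
  | [] => []
  | x :: rest =>
      if PySem.Set.contains s x then pvNewKeys s rest
      else x :: pvNewKeys (PySem.Set.add s x) rest

-- A's output loop over the dict items is a flatMap of blocks
lemma aLoop (l : List (Int × Int)) (acc : List Int) :
    l.foldl (fun acc kv =>
      let acc1 := acc ++ [kv.1]
      if kv.2 > 1 then acc1 ++ [kv.2] else acc1) acc
    = acc ++ l.flatMap (fun kv => kv.1 :: (if kv.2 > 1 then [kv.2] else [])) := by
  induction l generalizing acc with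
  | nil => simp
  | cons kv rest ih =>
    simp only [List.foldl_cons, List.flatMap_cons, ih]
    split <;> simp

-- B's loop appends the blocks of the not-yet-seen elements, in first-occurrence order
lemma bLoop (orig : List Int) (xs : List Int) (s : PySem.Set Int) (o : List Int) :
    (xs.foldl (fun st item =>
        if PySem.Set.contains st.1 item then st
        else
          let seen := PySem.Set.add st.1 item
          let out := st.2 ++ [item]
          let cnt : Int := (orig.count item : Int)
          (seen, if cnt > 1 then out ++ [cnt] else out)) (s, o)).2
    = o ++ (pvNewKeys s xs).flatMap (pvBlock orig) := by
  induction xs generalizing s o with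
  | nil => simp [pvNewKeys]
  | cons x rest ih =>
    simp only [List.foldl_cons, pvNewKeys]
    by_cases hc : PySem.Set.contains s x = true
    · simp only [hc, if_true, ih]
    · simp only [Bool.not_eq_true] at hc
      simp only [hc, Bool.false_eq_true, if_false, ih, List.flatMap_cons]
      have hcnt : (1 < orig.count x) ↔ ((orig.count x : Int) > 1) := by
        exact_mod_cast Iff.rfl
      split <;> rename_i h
      · simp [pvBlock, hcnt.mpr h]
      · have h' : ¬ 1 < orig.count x := fun hh => h (hcnt.mp hh)
        simp [pvBlock, h']

-- pvNewKeys is what Set.update appends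
lemma update_eq_append_pvNewKeys (xs : List Int) (s : PySem.Set Int) :
    PySem.Set.update s xs = s ++ pvNewKeys s xs := by
  induction xs generalizing s with
  | nil => simp [pvNewKeys, PySem.Set.update_nil]
  | cons x rest ih =>
    rw [PySem.Set.update_cons]
    simp only [pvNewKeys]
    by_cases hx : x ∈ s
    · rw [PySem.Set.add_of_mem hx, ih,
        if_pos ((PySem.Set.contains_iff _ _).2 hx)]
    · rw [if_neg (by simp [hx])]
      rw [ih, PySem.Set.add_of_not_mem hx]
      simp

lemma pvNewKeys_empty (xs : List Int) :
    pvNewKeys PySem.Set.empty xs = PySem.Set.ofList xs := by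
  have h := update_eq_append_pvNewKeys xs PySem.Set.empty
  simp only [PySem.Set.empty, PySem.Set.update_nil_left, List.nil_append] at h
  exact h.symm

-- ===== VERDICT (by name: the statement is the Claim_ definition above) =====
theorem freqlst_spec : Claim_equal_freqlst := by
  intro lst _
  unfold Spec_freqlst freqlst freqlst_alt
  rw [PySem.Dict.foldl_insert_getD_add_one_eq_counter, aLoop, bLoop, pvNewKeys_empty]
  simp only [PySem.Dict.items_counter, List.flatMap_map, List.nil_append]
  have hblk : ∀ a : Int,
      (a :: if ((List.count a lst : Int)) > 1 then [((List.count a lst : Int))] else [])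
        = pvBlock lst a := by
    intro a
    unfold pvBlock
    by_cases h : 1 < List.count a lst
    · rw [if_pos h, if_pos (by exact_mod_cast h)]
    · rw [if_neg h, if_neg (by exact_mod_cast h)]
  simp only [hblk]
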